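-- pv_equiv track=rewrite | github.com/w1gglyw0bbly/Random-Stuff | CS112Spring2022/Project 4/PA4Tester_and_Template/rdeangel_242_PA4.py | any_adjacent_vertebrates
-- ===== SOURCE A (Python) =====
-- def any_adjacent_vertebrates(animals, vertebrates):
--     for x in range(len(animals)):
--         for y in vertebrates:
--           #Checks if current animal is vertebrate and not last item in the list
--             if animals[x] == y and x != len(animals) - 1:
--                 for z in vertebrates:
--                     #Checks if animal ahead (next to) is vertebrate
--                     if animals[x + 1] == z:
--                         return True
--     return False
-- ===== SOURCE B (Python) =====
-- def any_adjacent_vertebrates(animals, vertebrates):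
--     # Pass 1: build a boolean table of each animal's vertebrate status (hashed membership).
--     vset = set(vertebrates)
--     flags = [animal in vset for animal in animals]
--     # Pass 2: scan the table for two consecutive True entries.
--     return any(f and g for f, g in zip(flags, flags[1:]))
-- ===== Notes on version B (the rewrite author's own statement) =====
-- stated objective: simpler
-- what changed: Replaces the triple nested loop (which re-scans the vertebrates list for both members of every candidate pair) with a table-first decomposition: a set of vertebrates is built once, one pass precomputes a membership flag per animal, then a separate zip scan checks for two adjacent True flags.
import Mathlib
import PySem

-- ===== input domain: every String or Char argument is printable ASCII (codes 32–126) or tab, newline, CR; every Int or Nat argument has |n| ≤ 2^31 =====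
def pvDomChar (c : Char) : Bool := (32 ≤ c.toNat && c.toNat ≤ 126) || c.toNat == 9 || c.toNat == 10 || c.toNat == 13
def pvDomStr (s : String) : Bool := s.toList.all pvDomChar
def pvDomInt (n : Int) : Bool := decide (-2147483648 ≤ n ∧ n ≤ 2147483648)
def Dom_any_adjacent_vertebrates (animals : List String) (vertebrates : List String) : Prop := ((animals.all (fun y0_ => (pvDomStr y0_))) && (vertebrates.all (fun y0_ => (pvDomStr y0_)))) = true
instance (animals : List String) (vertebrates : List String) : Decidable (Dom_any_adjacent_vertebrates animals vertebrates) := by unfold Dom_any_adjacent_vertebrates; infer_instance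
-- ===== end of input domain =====

-- B replaces A's triple nested loop by a table-first decomposition: build a vertebrate set once, map each animal to a membership flag, then scan the flag table for an adjacent True pair (objective: simpler).

-- ===== PORT A =====
-- inner 'for z in vertebrates: if animals[x+1] == z: return True'
def pvA_zLoop (animals : List String) (x : Int) : List String → Bool
  | [] => false
  | z :: zs =>
    if PySem.List.pyGet? animals (x + 1) == some z then true
    else pvA_zLoop animals x zs

-- middle 'for y in vertebrates: if animals[x] == y and x != len(animals)-1: <zLoop>'
def pvA_yLoop (animals : List String) (x : Int) (allv : List String) : List String → Bool
  | [] => false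
  | y :: ys =>
    if PySem.List.pyGet? animals x == some y && x != (animals.length : Int) - 1 then
      (if pvA_zLoop animals x allv then true else pvA_yLoop animals x allv ys)
    else pvA_yLoop animals x allv ys

-- outer 'for x in range(len(animals))'
def pvA_xLoop (animals vertebrates : List String) : List Int → Bool
  | [] => false
  | x :: xs =>
    if pvA_yLoop animals x vertebrates vertebrates then true
    else pvA_xLoop animals vertebrates xs

def any_adjacent_vertebrates (animals : List String) (vertebrates : List String) : Bool :=
  pvA_xLoop animals vertebrates (PySem.List.pyRange 0 (animals.length : Int) 1)

-- ===== PORT B =====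
def any_adjacent_vertebrates_alt (animals : List String) (vertebrates : List String) : Bool :=
  let vset := PySem.Set.ofList vertebrates
  let flags := animals.map (fun animal => PySem.Set.contains vset animal)
  ((flags.zip (PySem.List.slice flags (some 1) none)).any (fun p => p.1 && p.2))

-- ===== PRECONDITION & SPEC =====
def Spec_any_adjacent_vertebrates (animals : List String) (vertebrates : List String) (out : Bool) : Prop := out = any_adjacent_vertebrates_alt animals vertebrates
instance (animals : List String) (vertebrates : List String) (out : Bool) : Decidable (Spec_any_adjacent_vertebrates animals vertebrates out) := by unfold Spec_any_adjacent_vertebrates; infer_instance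

-- ===== CLAIM (what is proved, stated in full; the proofs are below) =====
def Claim_equal_any_adjacent_vertebrates : Prop := ∀ (animals : List String) (vertebrates : List String), Dom_any_adjacent_vertebrates animals vertebrates → Spec_any_adjacent_vertebrates animals vertebrates (any_adjacent_vertebrates animals vertebrates)

-- ===== LEMMAS AND PROOFS =====

theorem pvA_zLoop_eq (animals : List String) (x : Int) (zs : List String) :
    pvA_zLoop animals x zs = zs.any (fun z => PySem.List.pyGet? animals (x + 1) == some z) := by
  induction zs with
  | nil => rfl
  | cons z zs ih =>
    simp only [pvA_zLoop, List.any_cons, ih]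
    cases h : (PySem.List.pyGet? animals (x + 1) == some z)
    · simp [h]
    · simp

theorem pvA_yLoop_eq (animals : List String) (x : Int) (allv ys : List String) :
    pvA_yLoop animals x allv ys =
      (ys.any (fun y => PySem.List.pyGet? animals x == some y && x != (animals.length : Int) - 1)
        && pvA_zLoop animals x allv) := by
  induction ys with
  | nil => rfl
  | cons y ys ih =>
    simp only [pvA_yLoop, List.any_cons, ih]
    cases h : (PySem.List.pyGet? animals x == some y && x != (animals.length : Int) - 1)
    · simp [h]
    · cases hz : pvA_zLoop animals x allv
      · simp [hz]
      · simp

theorem pvA_xLoop_eq (animals vertebrates : List String) (L : List Int) :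
    pvA_xLoop animals vertebrates L = L.any (fun x => pvA_yLoop animals x vertebrates vertebrates) := by
  induction L with
  | nil => rfl
  | cons x xs ih =>
    simp only [pvA_xLoop, List.any_cons, ih]
    cases h : pvA_yLoop animals x vertebrates vertebrates
    · simp [h]
    · simp

theorem A_iff (animals vertebrates : List String) :
    any_adjacent_vertebrates animals vertebrates = true ↔
      ∃ i : Nat, ∃ h : i + 1 < animals.length,
        animals[i]'(Nat.lt_of_succ_lt h) ∈ vertebrates ∧ animals[i+1]'h ∈ vertebrates := by
  unfold any_adjacent_vertebrates
  rw [pvA_xLoop_eq, List.any_eq_true]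
  constructor
  · rintro ⟨x, hx, hy⟩
    rw [PySem.List.mem_pyRange_one] at hx
    obtain ⟨hx0, hxn⟩ := hx
    rw [pvA_yLoop_eq, pvA_zLoop_eq, Bool.and_eq_true, List.any_eq_true] at hy
    obtain ⟨⟨y, hyv, hyc⟩, hz⟩ := hy
    rw [Bool.and_eq_true] at hyc
    obtain ⟨hget, hne⟩ := hyc
    have hne' : x ≠ (animals.length : Int) - 1 := by simpa using hne
    have hxi : x = (x.toNat : Int) := by omega
    set i := x.toNat with hi
    have hi1 : i + 1 < animals.length := by omega
    refine ⟨i, hi1, ?_, ?_⟩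
    · rw [hxi, PySem.List.pyGet?_natCast, beq_iff_eq, List.getElem?_eq_some_iff] at hget
      obtain ⟨hlt, hg⟩ := hget
      rw [hg]; exact hyv
    · rw [List.any_eq_true] at hz
      obtain ⟨z, hzv, hzc⟩ := hz
      rw [beq_iff_eq, hxi,
        show ((i : Int) + 1) = ((i + 1 : Nat) : Int) by push_cast; ring,
        PySem.List.pyGet?_natCast, List.getElem?_eq_some_iff] at hzc
      obtain ⟨hlt, hg⟩ := hzc
      rw [hg]; exact hzv
  · rintro ⟨i, hi1, hmem1, hmem2⟩
    have hlt : i < animals.length := by omega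
    refine ⟨(i : Int), ?_, ?_⟩
    · rw [PySem.List.mem_pyRange_one]
      constructor
      · positivity
      · exact_mod_cast by omega
    · rw [pvA_yLoop_eq, pvA_zLoop_eq, Bool.and_eq_true, List.any_eq_true]
      refine ⟨⟨animals[i]'hlt, hmem1, ?_⟩, ?_⟩
      · rw [Bool.and_eq_true]
        constructor
        · rw [PySem.List.pyGet?_natCast, beq_iff_eq, List.getElem?_eq_some_iff]
          exact ⟨hlt, rfl⟩
        · simp; omega
      · rw [List.any_eq_true]
        refine ⟨animals[i+1]'hi1, hmem2, ?_⟩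
        rw [show ((i : Int) + 1) = ((i + 1 : Nat) : Int) by push_cast; ring,
          PySem.List.pyGet?_natCast, beq_iff_eq, List.getElem?_eq_some_iff]
        exact ⟨hi1, rfl⟩

-- the adjacency scan over a boolean table, characterised by indices
theorem adj_any_iff (L : List Bool) :
    ((L.zip L.tail).any (fun p => p.1 && p.2)) = true ↔
      ∃ i : Nat, ∃ h : i + 1 < L.length, L[i]'(Nat.lt_of_succ_lt h) = true ∧ L[i+1]'h = true := by
  induction L with
  | nil => simp
  | cons a t ih =>
    cases t with
    | nil => simp
    | cons b t' =>
      have hzip : ((a :: b :: t').zip (a :: b :: t').tail)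
          = (a, b) :: ((b :: t').zip (b :: t').tail) := by simp
      rw [hzip, List.any_cons]
      constructor
      · intro h
        rcases Bool.or_eq_true_iff.mp h with hab | hrest
        · rw [Bool.and_eq_true] at hab
          exact ⟨0, by simp, hab.1, hab.2⟩
        · obtain ⟨i, hi, h1, h2⟩ := ih.mp hrest
          exact ⟨i + 1, by simpa using Nat.succ_lt_succ hi, h1, h2⟩
      · rintro ⟨i, hi, h1, h2⟩
        cases i with
        | zero =>
          apply Bool.or_eq_true_iff.mpr
          left; rw [Bool.and_eq_true]
          exact ⟨h1, h2⟩
        | succ j =>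
          apply Bool.or_eq_true_iff.mpr
          right
          exact ih.mpr ⟨j, by simpa using Nat.lt_of_succ_lt_succ hi, h1, h2⟩

theorem B_iff (animals vertebrates : List String) :
    any_adjacent_vertebrates_alt animals vertebrates = true ↔
      ∃ i : Nat, ∃ h : i + 1 < animals.length,
        animals[i]'(Nat.lt_of_succ_lt h) ∈ vertebrates ∧ animals[i+1]'h ∈ vertebrates := by
  unfold any_adjacent_vertebrates_alt
  simp only [PySem.List.slice_from_one]
  show (((animals.map (fun animal => PySem.Set.contains (PySem.Set.ofList vertebrates) animal)).zip
      (animals.map (fun animal => PySem.Set.contains (PySem.Set.ofList vertebrates) animal)).tail).any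
        (fun p => p.1 && p.2)) = true ↔ _
  rw [adj_any_iff]
  constructor
  · rintro ⟨i, hi, h1, h2⟩
    rw [List.length_map] at hi
    rw [List.getElem_map] at h1 h2
    rw [PySem.Set.contains_iff, PySem.Set.mem_ofList] at h1 h2
    exact ⟨i, hi, h1, h2⟩
  · rintro ⟨i, hi, h1, h2⟩
    refine ⟨i, by simpa using hi, ?_, ?_⟩
    · rw [List.getElem_map, PySem.Set.contains_iff, PySem.Set.mem_ofList]; exact h1
    · rw [List.getElem_map, PySem.Set.contains_iff, PySem.Set.mem_ofList]; exact h2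

-- ===== VERDICT (by name: the statement is the Claim_ definition above) =====
theorem any_adjacent_vertebrates_spec : Claim_equal_any_adjacent_vertebrates := by
  intro animals vertebrates _
  unfold Spec_any_adjacent_vertebrates
  have hA := A_iff animals vertebrates
  have hB := B_iff animals vertebrates
  rw [← hB] at hA
  cases hval : any_adjacent_vertebrates_alt animals vertebrates
  · cases hval2 : any_adjacent_vertebrates animals vertebrates
    · rfl
    · rw [hval2, hval] at hA; simp at hA
  · exact hA.mpr hval
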